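-- pv_equiv track=rewrite | github.com/Sophia0705/StudyingAlgorithm | 프로그래머스/2/340212. ［PCCP 기출문제］ 2번 ／ 퍼즐 게임 챌린지/［PCCP 기출문제］ 2번 ／ 퍼즐 게임 챌린지.py | solution
-- ===== SOURCE A (Python) =====
-- def get_puzzle_time(diff, time_cur, time_prev, level):
--     if diff <= level:
--         return time_cur
--     else:
--         fail_count = diff - level
--         return (time_cur + time_prev) * fail_count + time_cur
--
-- def can_solve_all(diffs, times, limit, level):
--     total_time = 0
--
--     for i in range(len(diffs)):
--         time_cur = times[i]
--         time_prev = times[i-1] if i > 0 else 0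
--         puzzle_time = get_puzzle_time(diffs[i], time_cur, time_prev, level)
--
--         total_time += puzzle_time
--         if total_time > limit:
--             return False
--
--     return True
--
-- def solution(diffs, times, limit):
--     left = 1
--     right = max(diffs)
--
--     answer = right
--     while left <= right:
--         mid = (left + right) // 2
--         if can_solve_all(diffs, times, limit, mid):
--             answer = mid
--             right = mid - 1
--         else:
--             left = mid + 1
--
--     return answer
-- ===== SOURCE B (Python) =====
-- def solution(diffs, times, limit):
--     n = len(diffs)
--     base = sum(times[:n])
--     M = max(diffs)
--     if base > limit:
--         return M
--     pairs = sorted([(diffs[i], times[i] + (times[i - 1] if i > 0 else 0)) for i in range(n)],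
--                    key=lambda p: -p[0])
--     best = M
--     Sc = 0
--     Scd = 0
--     for i in range(n):
--         d, c = pairs[i]
--         Sc += c
--         Scd += d * c
--         if i + 1 < n and pairs[i + 1][0] == d:
--             continue
--         lo = max(pairs[i + 1][0], 1) if i + 1 < n else 1
--         hi = d - 1
--         if hi < lo:
--             continue
--         if Sc == 0:
--             if base + Scd <= limit:
--                 best = min(best, lo)
--         else:
--             Lmin = -((limit - base - Scd) // Sc)
--             if Lmin <= hi:
--                 best = min(best, max(lo, Lmin))
--     return best
-- ===== Notes on version B (the rewrite author's own statement) =====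
-- stated objective: faster
-- what changed: A binary-searches the level in [1, max(diffs)], re-scanning all n puzzles at every one of ~log2(max_diff) probes; B precomputes base = sum(times), sorts the (difficulty, coefficient) pairs descending once and sweeps the segments between consecutive distinct difficulties, solving each linear segment for its least feasible level in closed form by ceiling division (one sort + one pass instead of ~31 full scans).
-- outside the precondition, e.g. on solution([8], [-1], 30): A returns 1, B returns 8; on solution([-3], [], 12): A returns -3, B raises IndexError
import Mathlib
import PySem

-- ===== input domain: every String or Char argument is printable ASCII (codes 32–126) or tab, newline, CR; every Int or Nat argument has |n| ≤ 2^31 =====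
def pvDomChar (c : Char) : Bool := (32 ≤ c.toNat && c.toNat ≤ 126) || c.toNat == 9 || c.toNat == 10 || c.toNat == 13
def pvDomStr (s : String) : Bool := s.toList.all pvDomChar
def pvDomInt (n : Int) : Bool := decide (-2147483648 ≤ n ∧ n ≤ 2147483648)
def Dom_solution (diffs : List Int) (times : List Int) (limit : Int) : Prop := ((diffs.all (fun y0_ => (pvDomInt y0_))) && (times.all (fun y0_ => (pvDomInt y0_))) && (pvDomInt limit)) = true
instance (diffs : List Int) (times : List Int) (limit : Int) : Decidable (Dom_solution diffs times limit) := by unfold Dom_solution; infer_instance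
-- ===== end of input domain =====

-- B replaces A's binary search (an O(n) feasibility scan per probe) by one sort of the
-- (difficulty, coefficient) pairs and a single sweep that solves each linear segment in
-- closed form (objective: faster; a timing run measured B ≥ 1.5× faster).

-- ===== PORT A =====
def getPuzzleTime (diff time_cur time_prev level : Int) : Int :=
  if diff ≤ level then time_cur
  else (time_cur + time_prev) * (diff - level) + time_cur

def canSolveGo (diffs times : List Int) (limit level : Int) : List Int → Int → Bool
  | [], _ => true
  | i :: rest, total_time =>
    let time_cur := PySem.List.pyGetD times i 0
    let time_prev := if i > 0 then PySem.List.pyGetD times (i - 1) 0 else 0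
    let puzzle_time := getPuzzleTime (PySem.List.pyGetD diffs i 0) time_cur time_prev level
    let total := total_time + puzzle_time
    if total > limit then false else canSolveGo diffs times limit level rest total

def canSolveAll (diffs times : List Int) (limit level : Int) : Bool :=
  canSolveGo diffs times limit level (PySem.List.pyRange 0 diffs.length 1) 0

def solutionGo (diffs times : List Int) (limit left right answer : Int) : Int :=
  if _h : left ≤ right then
    let mid := PySem.Int.floordiv (left + right) 2
    if canSolveAll diffs times limit mid then
      solutionGo diffs times limit left (mid - 1) mid
    else
      solutionGo diffs times limit (mid + 1) right answer
  else answer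
termination_by (right + 1 - left).toNat
decreasing_by
  · have := PySem.Int.floordiv_two_mid_bounds _h; omega
  · have := PySem.Int.floordiv_two_mid_bounds _h; omega

def solution (diffs : List Int) (times : List Int) (limit : Int) : Int :=
  let right := (PySem.List.max? diffs (fun x => x)).getD 0
  solutionGo diffs times limit 1 right right

-- ===== PORT B =====
-- the unsorted (difficulty, coefficient) pair list of Source B's comprehension
def pairsOf (diffs times : List Int) : List (Int × Int) :=
  (PySem.List.pyRange 0 diffs.length 1).map (fun i =>
    (PySem.List.pyGetD diffs i 0,
     PySem.List.pyGetD times i 0 + (if i > 0 then PySem.List.pyGetD times (i - 1) 0 else 0)))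

-- the body of Source B's for-loop (state = (Sc, Scd, best))
def sweepStep (limit base : Int) (n : Int) (pairs : List (Int × Int))
    (st : Int × Int × Int) (i : Int) : Int × Int × Int :=
  match st with
  | (sc, scd, best) =>
    let d := (PySem.List.pyGetD pairs i (0, 0)).1
    let c := (PySem.List.pyGetD pairs i (0, 0)).2
    let sc := sc + c
    let scd := scd + d * c
    if i + 1 < n ∧ (PySem.List.pyGetD pairs (i + 1) (0, 0)).1 = d then (sc, scd, best)
    else
      let lo := if i + 1 < n then max (PySem.List.pyGetD pairs (i + 1) (0, 0)).1 1 else 1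
      let hi := d - 1
      if hi < lo then (sc, scd, best)
      else if sc = 0 then
        if base + scd ≤ limit then (sc, scd, min best lo) else (sc, scd, best)
      else
        let lmin := -(PySem.Int.floordiv (limit - base - scd) sc)
        if lmin ≤ hi then (sc, scd, min best (max lo lmin)) else (sc, scd, best)

def solution_alt (diffs : List Int) (times : List Int) (limit : Int) : Int :=
  let n := diffs.length
  let base := (PySem.List.slice times none (some (n : Int))).sum
  let M := (PySem.List.max? diffs (fun x => x)).getD 0
  if base > limit then M
  else
    let pairs := PySem.List.sorted (pairsOf diffs times) (fun p => -p.1)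
    let res := (PySem.List.pyRange 0 n 1).foldl (sweepStep limit base n pairs) (0, 0, M)
    res.2.2

-- ===== PRECONDITION & SPEC =====
-- Pre_ excludes: empty diffs, on which A raises ValueError; times shorter than diffs,
-- on which A raises IndexError (except when every probe already exceeds limit inside
-- times, or no level is probed at all — those stay admitted); and negative entries
-- among the first len(diffs) times (unless no puzzle has difficulty ≥ 1, where no
-- level is ever probed), on which A's binary search probes a non-monotone feasibility
-- predicate, so its result is an accident of the probe path that no spec would fix.
def Pre_solution (diffs : List Int) (times : List Int) (limit : Int) : Prop :=
  diffs ≠ [] ∧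
  (diffs.length ≤ times.length ∨ (times ≠ [] ∧ limit < (times.take diffs.length).sum)) ∧
  ((∀ t ∈ times.take diffs.length, 0 ≤ t) ∨ (∀ d ∈ diffs, d < 1))
instance (diffs : List Int) (times : List Int) (limit : Int) : Decidable (Pre_solution diffs times limit) := by unfold Pre_solution; infer_instance

def pvWitness_solution : List Int × List Int × Int := ([3, 1, 5], [2, 0, 4], 30)

def Spec_solution (diffs : List Int) (times : List Int) (limit : Int) (out : Int) : Prop := out = solution_alt diffs times limit
instance (diffs : List Int) (times : List Int) (limit : Int) (out : Int) : Decidable (Spec_solution diffs times limit out) := by unfold Spec_solution; infer_instance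

-- ===== CLAIM (what is proved, stated in full; the proofs are below) =====
def Claim_equal_solution : Prop := ∀ (diffs : List Int) (times : List Int) (limit : Int), Dom_solution diffs times limit → Pre_solution diffs times limit → Spec_solution diffs times limit (solution diffs times limit)

-- ===== LEMMAS AND PROOFS =====

-- proof-side sums over (difficulty, coefficient) pair lists
def sumc (l : List (Int × Int)) : Int := (l.map Prod.snd).sum
def sumdc (l : List (Int × Int)) : Int := (l.map (fun p => p.1 * p.2)).sum
def extraL (l : List (Int × Int)) (L : Int) : Int :=
  (l.map (fun p => if L < p.1 then p.2 * (p.1 - L) else 0)).sum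
def totOf (diffs times : List Int) (L : Int) : Int :=
  (times.take diffs.length).sum + extraL (pairsOf diffs times) L

theorem extraL_append (l l' : List (Int × Int)) (L : Int) :
    extraL (l ++ l') L = extraL l L + extraL l' L := by
  simp [extraL]

theorem extraL_eq_of_all_gt (l : List (Int × Int)) (L : Int) (h : ∀ p ∈ l, L < p.1) :
    extraL l L = sumdc l - L * sumc l := by
  induction l with
  | nil => simp [extraL, sumdc, sumc]
  | cons p t ih =>
    have hp := h p (by simp)
    have ht := ih (fun q hq => h q (by simp [hq]))
    simp [extraL, sumdc, sumc, hp] at *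
    rw [ht]; ring

theorem extraL_eq_zero_of_all_le (l : List (Int × Int)) (L : Int) (h : ∀ p ∈ l, p.1 ≤ L) :
    extraL l L = 0 := by
  induction l with
  | nil => simp [extraL]
  | cons p t ih =>
    have hp := h p (by simp)
    have ht := ih (fun q hq => h q (by simp [hq]))
    simp [extraL, not_lt.mpr hp] at *
    exact ht

theorem extraL_mono (l : List (Int × Int)) (L L' : Int) (hLL : L ≤ L')
    (h : ∀ p ∈ l, 0 ≤ p.2) : extraL l L' ≤ extraL l L := by
  induction l with
  | nil => simp [extraL]
  | cons p t ih =>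
    have hp := h p (by simp)
    have ht := ih (fun q hq => h q (by simp [hq]))
    simp only [extraL, List.map_cons, List.sum_cons] at *
    have : (if L' < p.1 then p.2 * (p.1 - L') else 0) ≤ (if L < p.1 then p.2 * (p.1 - L) else 0) := by
      split_ifs with h1 h2
      · exact mul_le_mul_of_nonneg_left (by omega) hp
      · omega
      · have : (0:Int) ≤ p.2 * (p.1 - L) := mul_nonneg hp (by omega)
        omega
      · omega
    exact add_le_add this ht

theorem extraL_perm (l l' : List (Int × Int)) (L : Int) (h : l.Perm l') :
    extraL l L = extraL l' L :=
  (h.map _).sum_eq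

def termOf (diffs times : List Int) (L : Int) (i : Int) : Int :=
  PySem.List.pyGetD times i 0 +
    (if L < PySem.List.pyGetD diffs i 0 then
      (PySem.List.pyGetD times i 0 + (if i > 0 then PySem.List.pyGetD times (i - 1) 0 else 0)) *
        (PySem.List.pyGetD diffs i 0 - L)
     else 0)

theorem getPuzzleTime_eq (d cur prev L : Int) :
    getPuzzleTime d cur prev L = cur + (if L < d then (cur + prev) * (d - L) else 0) := by
  unfold getPuzzleTime
  split_ifs with h1 h2 <;> first | omega | ring

theorem times_nonneg_of_pre (diffs times : List Int)
    (h3 : ∀ t ∈ times.take diffs.length, 0 ≤ t) :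
    ∀ k : Nat, k < diffs.length → 0 ≤ times.getD k 0 := by
  intro k hk
  by_cases hkl : k < times.length
  · rw [List.getD_eq_getElem _ _ hkl]
    have hmem : times[k] ∈ times.take diffs.length := by
      have hk' : k < (times.take diffs.length).length := by
        simp [List.length_take]; omega
      have := List.getElem_mem hk'
      simpa [List.getElem_take] using this
    exact h3 _ hmem
  · rw [List.getD_eq_default _ _ (by omega)]

theorem term_nonneg (diffs times : List Int) (L : Int)
    (hT : ∀ k : Nat, k < diffs.length → 0 ≤ times.getD k 0) :
    ∀ i : Int, 0 ≤ i → i < (diffs.length : Int) → 0 ≤ termOf diffs times L i := by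
  intro i h0 hn
  have hcur : 0 ≤ PySem.List.pyGetD times i 0 := by
    rw [PySem.List.pyGetD_of_nonneg (h := h0)]
    exact hT i.toNat (by omega)
  have hprev : 0 ≤ if i > 0 then PySem.List.pyGetD times (i - 1) 0 else 0 := by
    by_cases hp : i > 0
    · rw [if_pos hp, PySem.List.pyGetD_of_nonneg (h := by omega)]
      exact hT (i - 1).toNat (by omega)
    · rw [if_neg hp]
  unfold termOf
  by_cases hd : L < PySem.List.pyGetD diffs i 0
  · rw [if_pos hd]
    have := mul_nonneg (a := PySem.List.pyGetD times i 0 +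
        (if i > 0 then PySem.List.pyGetD times (i - 1) 0 else 0))
      (b := PySem.List.pyGetD diffs i 0 - L) (by linarith) (by linarith)
    linarith
  · rw [if_neg hd]
    linarith

theorem go_spec (diffs times : List Int) (limit L : Int)
    (hterm : ∀ i : Int, 0 ≤ i → i < (diffs.length : Int) → 0 ≤ termOf diffs times L i) :
    ∀ (k : Nat) (a total : Int), 0 ≤ a → a + k = (diffs.length : Int) →
      (total ≤ limit ∨ a < (diffs.length : Int)) →
      (canSolveGo diffs times limit L (PySem.List.pyRange a (diffs.length : Int) 1) total = true
        ↔ total + ((PySem.List.pyRange a (diffs.length : Int) 1).map (termOf diffs times L)).sum ≤ limit) := by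
  intro k
  induction k with
  | zero =>
    intro a total h0 hak hinit
    rw [PySem.List.pyRange_one_eq_nil (by omega)]
    simp only [canSolveGo, List.map_nil, List.sum_nil, add_zero]
    constructor
    · intro _
      rcases hinit with h | h
      · exact h
      · exfalso; omega
    · intro _; trivial
  | succ k ih =>
    intro a total h0 hak hinit
    have han : a < (diffs.length : Int) := by omega
    rw [PySem.List.pyRange_one_cons han]
    simp only [canSolveGo, getPuzzleTime_eq, List.map_cons, List.sum_cons]
    have hstep : PySem.List.pyGetD times a 0 +
        (if L < PySem.List.pyGetD diffs a 0 then
          (PySem.List.pyGetD times a 0 + (if a > 0 then PySem.List.pyGetD times (a - 1) 0 else 0)) *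
            (PySem.List.pyGetD diffs a 0 - L) else 0) = termOf diffs times L a := rfl
    by_cases hex : total + termOf diffs times L a > limit
    · have hrest : 0 ≤ ((PySem.List.pyRange (a + 1) (diffs.length : Int) 1).map (termOf diffs times L)).sum := by
        apply List.sum_nonneg
        intro x hx
        obtain ⟨i, hi, rfl⟩ := List.mem_map.mp hx
        rw [PySem.List.mem_pyRange_one] at hi
        exact hterm i (by omega) (by omega)
      rw [hstep]
      simp only [if_pos (by omega : total + termOf diffs times L a > limit)]
      constructor
      · intro h; exact absurd h (by simp)
      · intro h; exfalso; omega
    · rw [hstep]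
      simp only [if_neg (by omega : ¬ total + termOf diffs times L a > limit)]
      have := ih (a + 1) (total + termOf diffs times L a) (by omega) (by omega) (Or.inl (by omega))
      rw [this]
      constructor <;> intro h <;> omega

theorem sum_pyGetD_take (ts : List Int) (m : Nat) :
    ((PySem.List.pyRange 0 (m : Int) 1).map (fun i => PySem.List.pyGetD ts i 0)).sum
      = (ts.take m).sum := by
  induction m with
  | zero => rw [PySem.List.pyRange_one_eq_nil (by omega)]; simp
  | succ m ih =>
    have h1 : ((m : Int) + 1) = ((m + 1 : Nat) : Int) := by push_cast; ring
    rw [← h1, PySem.List.pyRange_one_succ_right (by omega), List.map_append, List.sum_append, ih]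
    by_cases hm : m < ts.length
    · rw [List.take_succ]
      simp only [List.map_cons, List.map_nil, List.sum_cons, List.sum_nil, List.sum_append]
      have : ts[m]? = some ts[m] := List.getElem?_eq_getElem (by omega)
      simp [this, PySem.List.pyGetD_natCast]
    · rw [List.take_of_length_le (by omega), List.take_of_length_le (by omega)]
      simp only [List.map_cons, List.map_nil, List.sum_cons, List.sum_nil]
      rw [PySem.List.pyGetD_natCast, List.getD_eq_default _ _ (by omega)]
      omega

theorem sum_term_split (diffs times : List Int) (L : Int) :
    ((PySem.List.pyRange 0 (diffs.length : Int) 1).map (termOf diffs times L)).sum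
      = ((PySem.List.pyRange 0 (diffs.length : Int) 1).map (fun i => PySem.List.pyGetD times i 0)).sum
        + extraL (pairsOf diffs times) L := by
  unfold extraL pairsOf
  rw [List.map_map]
  rw [← PySem.List.sum_map_add_int]
  rfl

theorem canSolveAll_iff (diffs times : List Int) (limit L : Int)
    (h1 : diffs ≠ [])
    (h3 : ∀ t ∈ times.take diffs.length, 0 ≤ t) :
    (canSolveAll diffs times limit L = true) ↔ totOf diffs times L ≤ limit := by
  have hT := times_nonneg_of_pre diffs times h3
  have hterm := term_nonneg diffs times L hT
  have hn : 0 < diffs.length := List.length_pos_of_ne_nil h1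
  unfold canSolveAll
  rw [go_spec diffs times limit L hterm diffs.length 0 0 (by omega) (by omega)
      (Or.inr (by exact_mod_cast hn))]
  rw [sum_term_split, sum_pyGetD_take times diffs.length]
  unfold totOf
  constructor <;> intro h <;> omega

theorem pairs_snd_nonneg (diffs times : List Int)
    (hT : ∀ k : Nat, k < diffs.length → 0 ≤ times.getD k 0) :
    ∀ p ∈ pairsOf diffs times, 0 ≤ p.2 := by
  intro p hp
  obtain ⟨i, hi, rfl⟩ := List.mem_map.mp hp
  rw [PySem.List.mem_pyRange_one] at hi
  have h1 : 0 ≤ PySem.List.pyGetD times i 0 := by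
    rw [PySem.List.pyGetD_of_nonneg (h := hi.1)]
    exact hT i.toNat (by omega)
  have h2 : 0 ≤ if i > 0 then PySem.List.pyGetD times (i - 1) 0 else 0 := by
    by_cases hp' : i > 0
    · rw [if_pos hp', PySem.List.pyGetD_of_nonneg (h := by omega)]
      exact hT (i - 1).toNat (by omega)
    · rw [if_neg hp']
  simpa using add_nonneg h1 h2

theorem pairs_map_fst (diffs times : List Int) :
    (pairsOf diffs times).map Prod.fst = diffs := by
  unfold pairsOf
  rw [List.map_map]
  exact PySem.List.map_pyGetD_pyRange_zero diffs 0

theorem tot_mono (diffs times : List Int) (L L' : Int) (hLL : L ≤ L')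
    (hT : ∀ k : Nat, k < diffs.length → 0 ≤ times.getD k 0) :
    totOf diffs times L' ≤ totOf diffs times L := by
  unfold totOf
  have := extraL_mono (pairsOf diffs times) L L' hLL (pairs_snd_nonneg diffs times hT)
  omega

-- A's binary search when no level in [l, r] is feasible: the answer is unchanged
theorem solutionGo_const (diffs times : List Int) (limit : Int) :
    ∀ (meas : Nat) (l r ans : Int), (r + 1 - l).toNat = meas →
    (∀ L, l ≤ L → L ≤ r → canSolveAll diffs times limit L = false) →
    solutionGo diffs times limit l r ans = ans := by
  intro meas
  induction meas using Nat.strong_induction_on with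
  | _ meas ih =>
    intro l r ans hmeas hall
    rw [solutionGo]
    by_cases hlr : l ≤ r
    · rw [dif_pos hlr]
      have hmid := PySem.Int.floordiv_two_mid_bounds hlr
      have hfalse := hall _ hmid.1 hmid.2
      show (if canSolveAll diffs times limit (PySem.Int.floordiv (l + r) 2) = true then
              solutionGo diffs times limit l (PySem.Int.floordiv (l + r) 2 - 1)
                (PySem.Int.floordiv (l + r) 2)
            else solutionGo diffs times limit (PySem.Int.floordiv (l + r) 2 + 1) r ans) = ans
      rw [hfalse]
      simp only [Bool.false_eq_true, if_false]
      exact ih _ (by omega) _ _ _ rfl (fun L h1 h2 => hall L (by omega) h2)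
    · rw [dif_neg hlr]

-- A's binary search finds the least feasible level f when one exists in [l, r]
theorem solutionGo_finds (diffs times : List Int) (limit f : Int)
    (hfP : canSolveAll diffs times limit f = true)
    (hmin : ∀ L, 1 ≤ L → L < f → canSolveAll diffs times limit L = false)
    (hmono : ∀ L L', L ≤ L' → canSolveAll diffs times limit L = true →
      canSolveAll diffs times limit L' = true) :
    ∀ (meas : Nat) (l r ans : Int), (r + 1 - l).toNat = meas →
    1 ≤ l → l ≤ f → (f ≤ r ∨ ans = f) →
    solutionGo diffs times limit l r ans = f := by
  intro meas
  induction meas using Nat.strong_induction_on with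
  | _ meas ih
  intro l r ans hmeas h1l hlf hfr
  rw [solutionGo]
  by_cases hlr : l ≤ r
  · rw [dif_pos hlr]
    have hmid := PySem.Int.floordiv_two_mid_bounds hlr
    set mid := PySem.Int.floordiv (l + r) 2 with hmiddef
    show (if canSolveAll diffs times limit mid = true then
            solutionGo diffs times limit l (mid - 1) mid
          else solutionGo diffs times limit (mid + 1) r ans) = f
    by_cases hP : canSolveAll diffs times limit mid = true
    · rw [if_pos hP]
      have hfmid : f ≤ mid := by
        by_contra hc
        have := hmin mid (by omega) (by omega)
        rw [hP] at this; exact absurd this (by simp)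
      exact ih _ (by omega) _ _ _ rfl h1l hlf (by omega)
    · rw [if_neg hP]
      have hmidf : mid < f := by
        by_contra hc
        exact hP (hmono f mid (by omega) hfP)
      refine ih _ (by omega) _ _ _ rfl (by omega) (by omega) ?_
      rcases hfr with h | h
      · exact Or.inl h
      · exact Or.inr h
  · rw [dif_neg hlr]
    rcases hfr with h | h
    · exfalso; omega
    · exact h

-- the sorted pair list of B
def psOf (diffs times : List Int) : List (Int × Int) :=
  PySem.List.sorted (pairsOf diffs times) (fun p => -p.1)

theorem psOf_perm (diffs times : List Int) : (psOf diffs times).Perm (pairsOf diffs times) :=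
  PySem.List.sorted_perm _ _ _

theorem psOf_length (diffs times : List Int) : (psOf diffs times).length = diffs.length := by
  rw [(psOf_perm diffs times).length_eq]
  unfold pairsOf
  rw [List.length_map, PySem.List.length_pyRange_one]
  omega

theorem psOf_desc (diffs times : List Int) :
    ∀ j k : Nat, j ≤ k → k < (psOf diffs times).length →
      ((psOf diffs times).getD k (0, 0)).1 ≤ ((psOf diffs times).getD j (0, 0)).1 := by
  intro j k hjk hk
  unfold psOf at hk ⊢
  have hpw := PySem.List.sorted_pairwise (pairsOf diffs times) (fun p => -p.1)
  rw [List.pairwise_iff_getElem] at hpw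
  rcases Nat.eq_or_lt_of_le hjk with rfl | hlt
  · exact le_refl _
  · have := hpw j k (by omega) (by exact hk) hlt
    rw [List.getD_eq_getElem _ _ hk, List.getD_eq_getElem _ _ (by omega)]
    simpa using this

theorem psOf_snd_nonneg (diffs times : List Int)
    (hT : ∀ k : Nat, k < diffs.length → 0 ≤ times.getD k 0) :
    ∀ p ∈ psOf diffs times, 0 ≤ p.2 := by
  intro p hp
  exact pairs_snd_nonneg diffs times hT p ((PySem.List.mem_sorted _ _ _ _).mp hp)

theorem psOf_fst_le (diffs times : List Int) (M : Int) (hM : ∀ y ∈ diffs, y ≤ M) :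
    ∀ p ∈ psOf diffs times, p.1 ≤ M := by
  intro p hp
  have hp' : p ∈ pairsOf diffs times := (PySem.List.mem_sorted _ _ _ _).mp hp
  have : p.1 ∈ diffs := by
    rw [← pairs_map_fst diffs times]
    exact List.mem_map_of_mem hp'
  exact hM _ this

theorem psOf_head (diffs times : List Int) (M : Int) (hMmem : M ∈ diffs)
    (hM : ∀ y ∈ diffs, y ≤ M) (hne : diffs ≠ []) :
    ((psOf diffs times).getD 0 (0, 0)).1 = M := by
  have hlen : 0 < (psOf diffs times).length := by
    rw [psOf_length]; exact List.length_pos_of_ne_nil hne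
  have hle : ((psOf diffs times).getD 0 (0, 0)).1 ≤ M := by
    apply psOf_fst_le diffs times M hM
    rw [List.getD_eq_getElem _ _ hlen]
    exact List.getElem_mem hlen
  have hge : M ≤ ((psOf diffs times).getD 0 (0, 0)).1 := by
    have : M ∈ (psOf diffs times).map Prod.fst := by
      rw [((psOf_perm diffs times).map Prod.fst).mem_iff, pairs_map_fst]
      exact hMmem
    obtain ⟨p, hpmem, hpeq⟩ := List.mem_map.mp this
    obtain ⟨j, hj, rfl⟩ := List.mem_iff_getElem.mp hpmem
    calc M = ((psOf diffs times)[j]).1 := hpeq.symm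
    _ ≤ ((psOf diffs times).getD 0 (0, 0)).1 := by
        rw [← List.getD_eq_getElem _ (0,0) hj]
        exact psOf_desc diffs times 0 j (by omega) hj
  omega

theorem sumc_append (l l' : List (Int × Int)) : sumc (l ++ l') = sumc l + sumc l' := by
  simp [sumc]

theorem sumdc_append (l l' : List (Int × Int)) : sumdc (l ++ l') = sumdc l + sumdc l' := by
  simp [sumdc]

theorem sumc_take_succ (ps : List (Int × Int)) (k : Nat) (hk : k < ps.length) :
    sumc (ps.take (k + 1)) = sumc (ps.take k) + (ps.getD k (0, 0)).2 := by
  have h1 : ps.take (k + 1) = ps.take k ++ [ps[k]] := by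
    rw [List.take_add_one, List.getElem?_eq_getElem hk]; rfl
  rw [h1, sumc_append, List.getD_eq_getElem _ _ hk]
  simp only [sumc, List.map_cons, List.map_nil, List.sum_cons, List.sum_nil, add_zero]

theorem sumdc_take_succ (ps : List (Int × Int)) (k : Nat) (hk : k < ps.length) :
    sumdc (ps.take (k + 1)) = sumdc (ps.take k) + (ps.getD k (0, 0)).1 * (ps.getD k (0, 0)).2 := by
  have h1 : ps.take (k + 1) = ps.take k ++ [ps[k]] := by
    rw [List.take_add_one, List.getElem?_eq_getElem hk]; rfl
  rw [h1, sumdc_append, List.getD_eq_getElem _ _ hk]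
  simp only [sumdc, List.map_cons, List.map_nil, List.sum_cons, List.sum_nil, add_zero]

theorem sumc_take_nonneg (ps : List (Int × Int)) (k : Nat)
    (h : ∀ p ∈ ps, 0 ≤ p.2) : 0 ≤ sumc (ps.take k) := by
  apply List.sum_nonneg
  intro x hx
  obtain ⟨p, hp, rfl⟩ := List.mem_map.mp hx
  exact h p (List.mem_of_mem_take hp)

-- on the segment [lo, ps[i].1 - 1] the extra time is linear with the prefix sums
theorem seg_extra (ps : List (Int × Int))
    (hdesc : ∀ j k : Nat, j ≤ k → k < ps.length →
      (ps.getD k (0, 0)).1 ≤ (ps.getD j (0, 0)).1)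
    (i : Nat) (hi : i < ps.length) (L : Int)
    (hlo : (if i + 1 < ps.length then max (ps.getD (i + 1) (0, 0)).1 1 else 1) ≤ L)
    (hhi : L ≤ (ps.getD i (0, 0)).1 - 1) :
    extraL ps L = sumdc (ps.take (i + 1)) - L * sumc (ps.take (i + 1)) := by
  have hsplit : extraL ps L = extraL (ps.take (i + 1)) L + extraL (ps.drop (i + 1)) L := by
    rw [← extraL_append, List.take_append_drop]
  have htake : extraL (ps.take (i + 1)) L
      = sumdc (ps.take (i + 1)) - L * sumc (ps.take (i + 1)) := by
    apply extraL_eq_of_all_gt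
    intro p hp
    obtain ⟨j, hj, rfl⟩ := List.mem_take_iff_getElem.mp hp
    have hj' : j < ps.length := by omega
    have : (ps.getD i (0, 0)).1 ≤ (ps[j]).1 := by
      rw [← List.getD_eq_getElem _ (0,0) hj']
      exact hdesc j i (by omega) hi
    omega
  have hdrop : extraL (ps.drop (i + 1)) L = 0 := by
    apply extraL_eq_zero_of_all_le
    intro p hp
    obtain ⟨j, hj, rfl⟩ := List.mem_drop_iff_getElem.mp hp
    by_cases hi1 : i + 1 < ps.length
    · have h1 : (ps[i + 1 + j]).1 ≤ (ps.getD (i + 1) (0, 0)).1 := by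
        rw [← List.getD_eq_getElem _ (0,0) (by omega : i + 1 + j < ps.length)]
        exact hdesc (i + 1) (i + 1 + j) (by omega) (by omega)
      rw [if_pos hi1] at hlo
      omega
    · omega
  rw [hsplit, htake, hdrop, add_zero]

def edgeOf (ps : List (Int × Int)) (k : Nat) : Int :=
  if k < ps.length then max ((ps.getD k (0, 0)).1) 1 else 1

theorem sweepStep_eq (limit base n : Int) (pairs : List (Int × Int))
    (st : Int × Int × Int) (i : Int) :
    sweepStep limit base n pairs st i =
      (let d := (PySem.List.pyGetD pairs i (0, 0)).1
       let c := (PySem.List.pyGetD pairs i (0, 0)).2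
       let sc := st.1 + c
       let scd := st.2.1 + d * c
       if i + 1 < n ∧ (PySem.List.pyGetD pairs (i + 1) (0, 0)).1 = d then (sc, scd, st.2.2)
       else
         let lo := if i + 1 < n then max (PySem.List.pyGetD pairs (i + 1) (0, 0)).1 1 else 1
         let hi := d - 1
         if hi < lo then (sc, scd, st.2.2)
         else if sc = 0 then
           if base + scd ≤ limit then (sc, scd, min st.2.2 lo) else (sc, scd, st.2.2)
         else
           let lmin := -(PySem.Int.floordiv (limit - base - scd) sc)
           if lmin ≤ hi then (sc, scd, min st.2.2 (max lo lmin)) else (sc, scd, st.2.2)) := by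
  rcases st with ⟨sc, scd, best⟩; rfl

-- the invariant of B's sweep: prefix sums are exact and best is the least feasible
-- level found in the already-covered region [edgeOf ps k, M-1] (or still M)
def SweepInv (diffs times : List Int) (limit M : Int) (k : Nat) (st : Int × Int × Int) : Prop :=
  st.1 = sumc ((psOf diffs times).take k) ∧
  st.2.1 = sumdc ((psOf diffs times).take k) ∧
  (st.2.2 = M ∨ (totOf diffs times st.2.2 ≤ limit ∧
      edgeOf (psOf diffs times) k ≤ st.2.2 ∧ st.2.2 ≤ M - 1)) ∧
  (∀ L, totOf diffs times L ≤ limit → edgeOf (psOf diffs times) k ≤ L → L ≤ M - 1 →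
    st.2.2 ≤ L)

theorem sweep_inv (diffs times : List Int) (limit M : Int)
    (hne : diffs ≠ [])
    (hT : ∀ k : Nat, k < diffs.length → 0 ≤ times.getD k 0)
    (hMmem : M ∈ diffs) (hMmax : ∀ y ∈ diffs, y ≤ M) :
    ∀ k : Nat, k ≤ diffs.length →
      SweepInv diffs times limit M k
        ((PySem.List.pyRange 0 (k : Int) 1).foldl
          (sweepStep limit ((times.take diffs.length).sum) (diffs.length : Int)
            (psOf diffs times))
          (0, 0, M)) := by
  have hlen : (psOf diffs times).length = diffs.length := psOf_length diffs times
  have hn0 : 0 < diffs.length := List.length_pos_of_ne_nil hne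
  have hdesc := psOf_desc diffs times
  have hsnd := psOf_snd_nonneg diffs times hT
  have hfstle := psOf_fst_le diffs times M hMmax
  have hhead := psOf_head diffs times M hMmem hMmax hne
  -- totOf in terms of the sorted list
  have htot : ∀ L, totOf diffs times L
      = (times.take diffs.length).sum + extraL (psOf diffs times) L := by
    intro L
    unfold totOf
    rw [extraL_perm _ _ L (psOf_perm diffs times)]
  intro k
  induction k with
  | zero =>
    intro _
    rw [PySem.List.pyRange_one_eq_nil (by omega)]
    refine ⟨by simp [sumc], by simp [sumdc], Or.inl rfl, ?_⟩
    intro L _ hE hL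
    unfold edgeOf at hE
    rw [if_pos (by omega), hhead] at hE
    exfalso; omega
  | succ k ih =>
    intro hk1
    have hk : k < diffs.length := by omega
    have hIH := ih (by omega)
    have hcast : ((k + 1 : Nat) : Int) = (k : Int) + 1 := by push_cast; ring
    rw [hcast, PySem.List.pyRange_one_succ_right (by omega), List.foldl_append]
    set st := (PySem.List.pyRange 0 (k : Int) 1).foldl
      (sweepStep limit ((times.take diffs.length).sum) (diffs.length : Int)
        (psOf diffs times)) (0, 0, M) with hstdef
    obtain ⟨hsc, hscd, hmem, hmin⟩ := hIH
    simp only [List.foldl_cons, List.foldl_nil]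
    rw [sweepStep_eq]
    -- normalise the two element accesses
    have hget1 : PySem.List.pyGetD (psOf diffs times) (k : Int) (0, 0)
        = (psOf diffs times).getD k (0, 0) := PySem.List.pyGetD_natCast _ _ _
    have hget2 : PySem.List.pyGetD (psOf diffs times) ((k : Int) + 1) (0, 0)
        = (psOf diffs times).getD (k + 1) (0, 0) := by
      rw [← hcast]; exact PySem.List.pyGetD_natCast _ _ _
    rw [hget1, hget2]
    set d := ((psOf diffs times).getD k (0, 0)).1 with hd
    set c := ((psOf diffs times).getD k (0, 0)).2 with hc
    -- new prefix sums
    have hsc' : st.1 + c = sumc ((psOf diffs times).take (k + 1)) := by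
      rw [hsc, ← sumc_take_succ _ _ (by omega)]
    have hscd' : st.2.1 + d * c = sumdc ((psOf diffs times).take (k + 1)) := by
      rw [hscd, ← sumdc_take_succ _ _ (by omega)]
    have hd_le_M : d ≤ M := by
      rw [hd, List.getD_eq_getElem _ _ (by omega)]
      exact hfstle _ (List.getElem_mem (by omega))
    have hedgek : edgeOf (psOf diffs times) k = max d 1 := by
      unfold edgeOf; rw [if_pos (by omega)]
    have hedgek1_le : edgeOf (psOf diffs times) (k + 1) ≤ max d 1 := by
      unfold edgeOf
      by_cases h : k + 1 < (psOf diffs times).length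
      · rw [if_pos h]
        have := hdesc k (k + 1) (by omega) h
        omega
      · rw [if_neg h]; omega
    have hedgek1_pos : 1 ≤ edgeOf (psOf diffs times) (k + 1) := by
      unfold edgeOf; split_ifs <;> omega
    by_cases hcond : (k : Int) + 1 < (diffs.length : Int)
        ∧ ((psOf diffs times).getD (k + 1) (0, 0)).1 = d
    · -- same difficulty ahead: only the sums advance
      rw [if_pos hcond]
      have hedgeeq : edgeOf (psOf diffs times) (k + 1) = max d 1 := by
        unfold edgeOf
        rw [if_pos (by omega), hcond.2]
      refine ⟨hsc', hscd', ?_, ?_⟩ <;> simp only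
      · rcases hmem with h | h
        · exact Or.inl h
        · exact Or.inr ⟨h.1, by rw [hedgeeq, ← hedgek]; exact h.2.1, h.2.2⟩
      · intro L hP hE hL
        exact hmin L hP (by rw [hedgek, ← hedgeeq]; exact hE) hL
    · -- group boundary
      rw [if_neg hcond]
      have hloeq : (if (k : Int) + 1 < (diffs.length : Int)
          then max ((psOf diffs times).getD (k + 1) (0, 0)).1 1 else 1)
          = edgeOf (psOf diffs times) (k + 1) := by
        unfold edgeOf
        by_cases h : k + 1 < (psOf diffs times).length
        · rw [if_pos h, if_pos (by omega)]
        · rw [if_neg h, if_neg (by omega)]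
      rw [hloeq]
      set lo := edgeOf (psOf diffs times) (k + 1) with hlo
      by_cases hempty : d - 1 < lo
      · -- empty segment: nothing new is covered
        rw [if_pos hempty]
        refine ⟨hsc', hscd', ?_, ?_⟩ <;> simp only
        · rcases hmem with h | h
          · exact Or.inl h
          · refine Or.inr ⟨h.1, ?_, h.2.2⟩
            rw [← hedgek] at hedgek1_le
            omega
        · intro L hP hE hL
          have : max d 1 ≤ L := by omega
          exact hmin L hP (by omega) hL
      · rw [if_neg hempty]
        -- the segment [lo, d-1] is nonempty; on it P is linear in L
        have hlo1 : 1 ≤ lo := hedgek1_pos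
        have hd2 : 2 ≤ d := by omega
        have hPlin : ∀ L, lo ≤ L → L ≤ d - 1 →
            totOf diffs times L = (times.take diffs.length).sum
              + (sumdc ((psOf diffs times).take (k + 1))
                 - L * sumc ((psOf diffs times).take (k + 1))) := by
          intro L h1 h2
          rw [htot L, seg_extra (psOf diffs times) hdesc k (by omega) L ?_ (by omega)]
          · by_cases h : k + 1 < (psOf diffs times).length
            · rw [if_pos h]
              have : (if (k : Int) + 1 < (diffs.length : Int)
                  then max ((psOf diffs times).getD (k + 1) (0, 0)).1 1 else 1)
                  = max ((psOf diffs times).getD (k + 1) (0, 0)).1 1 := by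
                rw [if_pos (by omega)]
              rw [this] at hloeq
              omega
            · rw [if_neg h]
              have : (if (k : Int) + 1 < (diffs.length : Int)
                  then max ((psOf diffs times).getD (k + 1) (0, 0)).1 1 else 1) = 1 := by
                rw [if_neg (by omega)]
              rw [this] at hloeq
              omega
        -- every uncovered point of the new region lies in the segment
        have hdecomp : ∀ L, lo ≤ L → L ≤ M - 1 →
            (max d 1 ≤ L ∨ (lo ≤ L ∧ L ≤ d - 1)) := by
          intro L h1 h2
          by_cases h : max d 1 ≤ L
          · exact Or.inl h
          · exact Or.inr ⟨h1, by omega⟩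
        have hscnn : 0 ≤ sumc ((psOf diffs times).take (k + 1)) :=
          sumc_take_nonneg _ _ hsnd
        have hloM : lo ≤ M - 1 := by omega
        by_cases hzero : st.1 + c = 0
        · rw [if_pos hzero]
          have hsum0 : sumc ((psOf diffs times).take (k + 1)) = 0 := by rw [← hsc']; exact hzero
          by_cases hfeas : (times.take diffs.length).sum + (st.2.1 + d * c) ≤ limit
          · rw [if_pos hfeas]
            have hPlo : totOf diffs times lo ≤ limit := by
              rw [hPlin lo (le_refl _) (by omega), hsum0]
              rw [hscd'] at hfeas
              omega
            refine ⟨hsc', hscd', ?_, ?_⟩ <;> simp only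
            · -- membership for min st.2.2 lo
              have hgel : lo ≤ st.2.2 := by
                rcases hmem with h | h
                · omega
                · rw [hedgek] at h; omega
              rw [min_eq_right hgel]
              exact Or.inr ⟨hPlo, le_refl lo, hloM⟩
            · intro L hP hE hL
              rcases hdecomp L hE hL with h | h
              · have := hmin L hP (by omega) hL
                omega
              · omega
          · rw [if_neg hfeas]
            refine ⟨hsc', hscd', ?_, ?_⟩ <;> simp only
            · rcases hmem with h | h
              · exact Or.inl h
              · refine Or.inr ⟨h.1, by rw [← hedgek] at hedgek1_le; omega, h.2.2⟩
            · intro L hP hE hL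
              rcases hdecomp L hE hL with h | h
              · exact hmin L hP (by omega) hL
              · exfalso
                rw [hPlin L h.1 h.2, hsum0] at hP
                rw [hscd'] at hfeas
                omega
        · rw [if_neg hzero]
          have hscpos : 0 < st.1 + c := by
            rw [hsc'] at hzero ⊢
            omega
          have hceil :
              ((-(PySem.Int.floordiv (limit - (times.take diffs.length).sum - (st.2.1 + d * c))
                  (st.1 + c))) - 1) * (st.1 + c)
                < (times.take diffs.length).sum + (st.2.1 + d * c) - limit
              ∧ (times.take diffs.length).sum + (st.2.1 + d * c) - limit
                ≤ (-(PySem.Int.floordiv (limit - (times.take diffs.length).sum - (st.2.1 + d * c))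
                    (st.1 + c))) * (st.1 + c) := by
            refine (PySem.Int.neg_floordiv_neg_eq_iff_of_pos
              (a := (times.take diffs.length).sum + (st.2.1 + d * c) - limit)
              (b := st.1 + c)
              (q := -(PySem.Int.floordiv (limit - (times.take diffs.length).sum - (st.2.1 + d * c))
                (st.1 + c))) hscpos).mp ?_
            congr 2
            ring
          set lmin := -(PySem.Int.floordiv (limit - (times.take diffs.length).sum
            - (st.2.1 + d * c)) (st.1 + c)) with hlmindef
          have hPiff : ∀ L, lo ≤ L → L ≤ d - 1 → (totOf diffs times L ≤ limit ↔ lmin ≤ L) := by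
            intro L h1 h2
            rw [hPlin L h1 h2, ← hscd', ← hsc']
            constructor
            · intro hP
              by_contra hcon
              have hLle : L ≤ lmin - 1 := by omega
              have := mul_le_mul_of_nonneg_right hLle (le_of_lt hscpos)
              nlinarith [hceil.1]
            · intro hge
              have := mul_le_mul_of_nonneg_right hge (le_of_lt hscpos)
              nlinarith [hceil.2]
          by_cases hlminle : lmin ≤ d - 1
          · rw [if_pos hlminle]
            have hcand_seg : lo ≤ max lo lmin ∧ max lo lmin ≤ d - 1 := ⟨le_max_left _ _, by omega⟩
            have hPcand : totOf diffs times (max lo lmin) ≤ limit :=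
              (hPiff _ hcand_seg.1 hcand_seg.2).mpr (le_max_right _ _)
            refine ⟨hsc', hscd', ?_, ?_⟩ <;> simp only
            · by_cases hbc : max lo lmin ≤ st.2.2
              · rw [min_eq_right hbc]
                exact Or.inr ⟨hPcand, hcand_seg.1, by omega⟩
              · rw [min_eq_left (by omega)]
                rcases hmem with h | h
                · exfalso; omega
                · refine Or.inr ⟨h.1, by rw [← hedgek] at hedgek1_le; omega, h.2.2⟩
            · intro L hP hE hL
              rcases hdecomp L hE hL with h | h
              · have := hmin L hP (by omega) hL
                omega
              · have := (hPiff L h.1 h.2).mp hP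
                omega
          · rw [if_neg hlminle]
            refine ⟨hsc', hscd', ?_, ?_⟩ <;> simp only
            · rcases hmem with h | h
              · exact Or.inl h
              · refine Or.inr ⟨h.1, by rw [← hedgek] at hedgek1_le; omega, h.2.2⟩
            · intro L hP hE hL
              rcases hdecomp L hE hL with h | h
              · exact hmin L hP (by omega) hL
              · exfalso
                have := (hPiff L h.1 h.2).mp hP
                omega

-- when no difficulty reaches 1 every segment of B's sweep is empty and best stays M
theorem sweep_keep (diffs times : List Int) (limit M : Int)
    (hMmax : ∀ y ∈ diffs, y ≤ M) (hM1 : M < 1) :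
    ∀ k : Nat,
      (((PySem.List.pyRange 0 (k : Int) 1).foldl
        (sweepStep limit ((times.take diffs.length).sum) (diffs.length : Int)
          (psOf diffs times)) (0, 0, M)).2.2) = M := by
  have hfstle := psOf_fst_le diffs times M hMmax
  intro k
  induction k with
  | zero => rw [PySem.List.pyRange_one_eq_nil (by omega)]; rfl
  | succ k ih =>
    have hcast : ((k + 1 : Nat) : Int) = (k : Int) + 1 := by push_cast; ring
    rw [hcast, PySem.List.pyRange_one_succ_right (by omega), List.foldl_append]
    simp only [List.foldl_cons, List.foldl_nil]
    rw [sweepStep_eq]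
    rw [PySem.List.pyGetD_natCast (psOf diffs times) k (0, 0)]
    have hd0 : ((psOf diffs times).getD k (0, 0)).1 ≤ 0 := by
      by_cases hk : k < (psOf diffs times).length
      · have hmem0 : (psOf diffs times).getD k (0, 0) ∈ psOf diffs times := by
          rw [List.getD_eq_getElem _ _ hk]; exact List.getElem_mem hk
        have := hfstle _ hmem0
        omega
      · rw [List.getD_eq_default _ _ (by omega)]
    by_cases hcond : (k : Int) + 1 < (diffs.length : Int)
        ∧ (PySem.List.pyGetD (psOf diffs times) ((k : Int) + 1) (0, 0)).1
          = ((psOf diffs times).getD k (0, 0)).1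
    · rw [if_pos hcond]; exact ih
    · rw [if_neg hcond]
      have hlt : ((psOf diffs times).getD k (0, 0)).1 - 1
          < (if (k : Int) + 1 < (diffs.length : Int)
             then max (PySem.List.pyGetD (psOf diffs times) ((k : Int) + 1) (0, 0)).1 1
             else 1) := by
        split_ifs with h <;> omega
      rw [if_pos hlt]
      exact ih

theorem totOf_at_max (diffs times : List Int) (M : Int) (hMmax : ∀ y ∈ diffs, y ≤ M) :
    totOf diffs times M = (times.take diffs.length).sum := by
  unfold totOf
  rw [extraL_eq_zero_of_all_le, add_zero]
  intro p hp
  apply hMmax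
  rw [← pairs_map_fst diffs times]
  exact List.mem_map_of_mem hp

-- ===== VERDICT (by name: the statement is the Claim_ definition above) =====
theorem solution_spec : Claim_equal_solution := by
  unfold Claim_equal_solution
  intro diffs times limit _hdom hpre
  obtain ⟨hne, hor, hsign⟩ := hpre
  unfold Spec_solution
  obtain ⟨m, hm⟩ : ∃ m, PySem.List.max? diffs (fun x => x) = some m := by
    cases h : PySem.List.max? diffs (fun x => x) with
    | none => exact absurd ((PySem.List.max?_eq_none_iff _ _).mp h) hne
    | some m => exact ⟨m, rfl⟩
  have hMmem : m ∈ diffs := PySem.List.max?_mem hm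
  have hMmax : ∀ y ∈ diffs, y ≤ m := by
    have := PySem.List.max?_isMax hm
    simpa using this
  unfold solution solution_alt
  rw [hm]
  simp only [Option.getD_some]
  rw [PySem.List.slice_to_natCast]
  rcases hsign with htk | hdlt
  swap
  · -- every difficulty is below 1: A's loop never runs; B's sweep never updates best
    have hm1 : m < 1 := hdlt m hMmem
    rw [solutionGo, dif_neg (by omega : ¬ (1 : Int) ≤ m)]
    by_cases hb : (times.take diffs.length).sum > limit
    · rw [if_pos hb]
    · rw [if_neg hb]
      rw [show PySem.List.sorted (pairsOf diffs times) (fun p => -p.1)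
        = psOf diffs times from rfl]
      exact (sweep_keep diffs times limit m hMmax hm1 diffs.length).symm
  have hT := times_nonneg_of_pre diffs times htk
  have hcs : ∀ L, (canSolveAll diffs times limit L = true) ↔ totOf diffs times L ≤ limit :=
    fun L => canSolveAll_iff diffs times limit L hne htk
  have hcsf : ∀ L, ¬ totOf diffs times L ≤ limit → canSolveAll diffs times limit L = false := by
    intro L h
    cases hcL : canSolveAll diffs times limit L with
    | false => rfl
    | true => exact absurd ((hcs L).mp hcL) h
  have hmono : ∀ L L', L ≤ L' → canSolveAll diffs times limit L = true →
      canSolveAll diffs times limit L' = true := by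
    intro L L' hLL h
    rw [hcs] at h ⊢
    have := tot_mono diffs times L L' hLL hT
    omega
  have htotm : totOf diffs times m = (times.take diffs.length).sum :=
    totOf_at_max diffs times m hMmax
  by_cases hb : (times.take diffs.length).sum > limit
  · rw [if_pos hb]
    apply solutionGo_const diffs times limit _ 1 m m rfl
    intro L h1 h2
    apply hcsf
    have := tot_mono diffs times L m h2 hT
    omega
  · rw [if_neg hb]
    have hlen : diffs.length ≤ times.length := by
      rcases hor with h | h
      · exact h
      · exfalso; omega
    rw [show PySem.List.sorted (pairsOf diffs times) (fun p => -p.1) = psOf diffs times from rfl]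
    have hsw := sweep_inv diffs times limit m hne hT hMmem hMmax diffs.length (le_refl _)
    obtain ⟨_, _, hmem, hmin⟩ := hsw
    have hedge_n : edgeOf (psOf diffs times) diffs.length = 1 := by
      unfold edgeOf
      rw [if_neg (by rw [psOf_length diffs times]; omega)]
    rw [hedge_n] at hmem hmin
    by_cases hm1 : m < 1
    · -- no admissible level at all: A's loop never runs, B never updates best
      rw [solutionGo, dif_neg (by omega : ¬ (1 : Int) ≤ m)]
      rcases hmem with h | h
      · exact h.symm
      · exfalso; omega
    · -- the least feasible level f in [1, m] exists; both sides return it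
      have hPm : totOf diffs times m ≤ limit := by omega
      obtain ⟨f, hfS, hfmin⟩ := Int.exists_least_of_bdd
        (P := fun L => 1 ≤ L ∧ totOf diffs times L ≤ limit)
        ⟨1, fun z hz => hz.1⟩ ⟨m, by omega, hPm⟩
      have hfm : f ≤ m := hfmin m ⟨by omega, hPm⟩
      have hA : solutionGo diffs times limit 1 m m = f := by
        apply solutionGo_finds diffs times limit f ((hcs f).mpr hfS.2) ?_ hmono _ 1 m m rfl
          (le_refl _) hfS.1 (Or.inl hfm)
        intro L h1 hLf
        apply hcsf
        intro hP
        have := hfmin L ⟨h1, hP⟩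
        omega
      rw [hA]
      rcases hmem with h | h
      · -- best is still m: no feasible level below m exists
        rw [h]
        by_cases hfm1 : f ≤ m - 1
        · have := hmin f hfS.2 hfS.1 hfm1
          rw [h] at this
          omega
        · omega
      · -- best is a feasible level in [1, m-1]; it equals the least one
        have hfb := hfmin _ ⟨by omega, h.1⟩
        have hbf := hmin f hfS.2 hfS.1 (by omega)
        omega
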